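-- pv_equiv track=rewrite | github.com/collinsakuma/LeetCode | Problems/874. Walking Robot Simulation/walking_robot_simulation.py | robotSimTwo
-- ===== SOURCE A (Python) =====
-- def robotSimTwo(commands, obstacles):
--     x, y, d = 0, 0, 0
--     # directions for north, south, east west
--     direction = [(0, 1), (1, 0), (0, -1), (-1, 0)]
--     max_distance = 0 # track max distance
--     obstacles = set(map(tuple, obstacles)) # create a set of the obstacles
--
--     # loop through the commands
--     for command in commands:
--         # if the command is to change direction set a new direction
--         if command == -1:
--             d = (d + 1) % 4
--         elif command == -2:
--             d = (d - 1) % 4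
--         else:
--             # loop through the command distance
--             for _ in range(command):
--                 # set new x or y position
--                 nx, ny = x + direction[d][0], y + direction[d][1]
--                 if (nx, ny) in obstacles:
--                     # if an obstacle is reached break from the command
--                     break
--                 x, y = nx, ny
--                 # find the max distance
--                 max_distance = max(max_distance, x**2 + y**2)
--
--     return max_distance # return the max distance
-- ===== SOURCE B (Python) =====
-- def robotSimTwo(commands, obstacles):
--     # obstacle points (only well-formed [x, y] pairs can ever be hit)
--     pts = [(ob[0], ob[1]) for ob in obstacles if len(ob) == 2]
--     dirs = [(0, 1), (1, 0), (0, -1), (-1, 0)]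
--     x = y = d = 0
--     best = 0
--     for c in commands:
--         if c == -1:
--             d = (d + 1) % 4
--         elif c == -2:
--             d = (d - 1) % 4
--         elif c > 0:
--             dx, dy = dirs[d]
--             # nearest obstacle strictly ahead on the current ray
--             near = None
--             for ox, oy in pts:
--                 if dx == 0:
--                     if ox != x or dy * (oy - y) <= 0:
--                         continue
--                     t = dy * (oy - y)
--                 else:
--                     if oy != y or dx * (ox - x) <= 0:
--                         continue
--                     t = dx * (ox - x)
--                 if near is None or t < near:
--                     near = t
--             k = c if near is None else min(c, near - 1)
--             if k > 0:
--                 fx, fy = x + dx, y + dy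
--                 x, y = x + k * dx, y + k * dy
--                 # squared distance along the segment is convex: max at an endpoint
--                 best = max(best, fx * fx + fy * fy, x * x + y * y)
--     return best
-- ===== Notes on version B (the rewrite author's own statement) =====
-- stated objective: faster
-- what changed: B replaces the per-step simulation (one set lookup per unit step) by a per-command jump: it scans the obstacle pairs once to find the nearest obstacle ahead on the ray, moves the whole command in one arithmetic step, and updates the maximum using only the two endpoints of the segment (x^2+y^2 is convex along it).
import Mathlib
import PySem

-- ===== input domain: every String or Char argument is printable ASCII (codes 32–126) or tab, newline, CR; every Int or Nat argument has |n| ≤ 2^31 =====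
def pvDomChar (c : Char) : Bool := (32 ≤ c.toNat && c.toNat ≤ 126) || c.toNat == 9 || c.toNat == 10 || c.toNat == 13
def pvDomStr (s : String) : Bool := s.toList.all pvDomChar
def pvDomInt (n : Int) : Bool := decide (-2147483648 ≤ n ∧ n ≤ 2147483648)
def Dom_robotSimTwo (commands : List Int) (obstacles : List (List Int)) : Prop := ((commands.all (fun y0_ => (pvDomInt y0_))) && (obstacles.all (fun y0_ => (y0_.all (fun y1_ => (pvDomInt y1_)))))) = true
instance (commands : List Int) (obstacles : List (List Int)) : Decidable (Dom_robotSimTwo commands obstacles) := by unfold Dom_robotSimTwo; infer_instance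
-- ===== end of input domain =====

-- B replaces A's per-unit-step walk by a per-command jump to the nearest obstacle ahead,
-- updating the maximum at the two endpoints of each segment only (x^2+y^2 is convex along it).

-- ===== PORT A =====
-- direction[d] for the list [(0,1),(1,0),(0,-1),(-1,0)]; exact on d ∈ {0,1,2,3},
-- the only values d takes (it is only ever updated by (d±1) % 4 from 0)
def pvDir (d : Int) : Int × Int :=
  if d = 0 then (0, 1) else if d = 1 then (1, 0) else if d = 2 then (0, -1) else (-1, 0)

-- A's inner 'for _ in range(command)' loop with its break
def pvStep (obs : PySem.Set (List Int)) (dx dy : Int) : Nat → Int × Int × Int → Int × Int × Int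
  | 0, s => s
  | m + 1, (x, y, md) =>
    let nx := x + dx
    let ny := y + dy
    if PySem.Set.contains obs [nx, ny] then (x, y, md)
    else pvStep obs dx dy m (nx, ny, max md (nx ^ 2 + ny ^ 2))

-- A's 'for command in commands' body, state (x, y, d, max_distance)
def pvLoopA (obs : PySem.Set (List Int)) (s : Int × Int × Int × Int) (command : Int) :
    Int × Int × Int × Int :=
  let (x, y, d, md) := s
  if command = -1 then (x, y, PySem.Int.mod (d + 1) 4, md)
  else if command = -2 then (x, y, PySem.Int.mod (d - 1) 4, md)
  else
    let dxy := pvDir d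
    let r := pvStep obs dxy.1 dxy.2 command.toNat (x, y, md)
    (r.1, r.2.1, d, r.2.2)

def robotSimTwo (commands : List Int) (obstacles : List (List Int)) : Int :=
  (commands.foldl (pvLoopA (PySem.Set.ofList obstacles)) (0, 0, 0, 0)).2.2.2

-- ===== PORT B =====
-- [(ob[0], ob[1]) for ob in obstacles if len(ob) == 2]
def pvPts (obstacles : List (List Int)) : List (Int × Int) :=
  obstacles.filterMap (fun ob => match ob with | [a, b] => some (a, b) | _ => none)

-- distance to obstacle (ox,oy) if it lies strictly ahead on the ray from (x,y) along (dx,dy)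
def pvAhead (x y dx dy ox oy : Int) : Option Int :=
  if dx = 0 then
    if ox ≠ x ∨ dy * (oy - y) ≤ 0 then none else some (dy * (oy - y))
  else
    if oy ≠ y ∨ dx * (ox - x) ≤ 0 then none else some (dx * (ox - x))

-- B's 'for ox, oy in pts' loop accumulating the nearest distance
def pvNearFold (f : Int × Int → Option Int) : List (Int × Int) → Option Int → Option Int
  | [], acc => acc
  | p :: r, acc =>
    pvNearFold f r
      (match f p, acc with
       | none, acc => acc
       | some t, none => some t
       | some t, some u => if t < u then some t else some u)

def pvNear (pts : List (Int × Int)) (x y dx dy : Int) : Option Int :=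
  pvNearFold (fun p => pvAhead x y dx dy p.1 p.2) pts none

-- B's dirs[d] table
def pvDirB (d : Int) : Int × Int :=
  if d = 0 then (0, 1) else if d = 1 then (1, 0) else if d = 2 then (0, -1) else (-1, 0)

-- B's 'for c in commands' body, state (x, y, d, best)
def pvLoopB (pts : List (Int × Int)) (s : Int × Int × Int × Int) (c : Int) :
    Int × Int × Int × Int :=
  let (x, y, d, best) := s
  if c = -1 then (x, y, PySem.Int.mod (d + 1) 4, best)
  else if c = -2 then (x, y, PySem.Int.mod (d - 1) 4, best)
  else if c > 0 then
    let dxy := pvDirB d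
    let dx := dxy.1
    let dy := dxy.2
    let k : Int := match pvNear pts x y dx dy with
      | none => c
      | some t => min c (t - 1)
    if k > 0 then
      let fx := x + dx
      let fy := y + dy
      let x' := x + k * dx
      let y' := y + k * dy
      (x', y', d, max (max best (fx * fx + fy * fy)) (x' * x' + y' * y'))
    else s
  else s

def robotSimTwo_alt (commands : List Int) (obstacles : List (List Int)) : Int :=
  (commands.foldl (pvLoopB (pvPts obstacles)) (0, 0, 0, 0)).2.2.2

-- ===== PRECONDITION & SPEC =====
def Spec_robotSimTwo (commands : List Int) (obstacles : List (List Int)) (out : Int) : Prop := out = robotSimTwo_alt commands obstacles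
instance (commands : List Int) (obstacles : List (List Int)) (out : Int) : Decidable (Spec_robotSimTwo commands obstacles out) := by unfold Spec_robotSimTwo; infer_instance

-- ===== CLAIM (what is proved, stated in full; the proofs are below) =====
def Claim_equal_robotSimTwo : Prop := ∀ (commands : List Int) (obstacles : List (List Int)), Dom_robotSimTwo commands obstacles → Spec_robotSimTwo commands obstacles (robotSimTwo commands obstacles)

-- ===== LEMMAS AND PROOFS =====

def DirOK (dx dy : Int) : Prop :=
  (dx = 0 ∧ dy = 1) ∨ (dx = 1 ∧ dy = 0) ∨ (dx = 0 ∧ dy = -1) ∨ (dx = -1 ∧ dy = 0)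

lemma pvDir_ok (d : Int) : DirOK (pvDir d).1 (pvDir d).2 := by
  unfold pvDir DirOK; split_ifs <;> simp

lemma pvDirB_eq (d : Int) : pvDirB d = pvDir d := rfl

lemma pts_mem (obstacles : List (List Int)) (a b : Int) :
    (a, b) ∈ pvPts obstacles ↔ [a, b] ∈ obstacles := by
  unfold pvPts
  rw [List.mem_filterMap]
  constructor
  · rintro ⟨ob, hob, hf⟩
    match ob, hf with
    | [a', b'], hf => simp_all
  · intro h
    exact ⟨[a, b], h, rfl⟩

lemma contains_iff_pts (obstacles : List (List Int)) (a b : Int) :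
    PySem.Set.contains (PySem.Set.ofList obstacles) [a, b] = true ↔ (a, b) ∈ pvPts obstacles := by
  rw [PySem.Set.contains_iff, PySem.Set.mem_ofList, pts_mem]

lemma ahead_pos (x y dx dy ox oy t : Int) (h : pvAhead x y dx dy ox oy = some t) : 1 ≤ t := by
  unfold pvAhead at h
  by_cases hdx : dx = 0
  · rw [if_pos hdx] at h
    by_cases hc : ox ≠ x ∨ dy * (oy - y) ≤ 0
    · rw [if_pos hc] at h; exact absurd h (by simp)
    · rw [if_neg hc] at h
      push_neg at hc
      simp only [Option.some.injEq] at h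
      have := hc.2
      omega
  · rw [if_neg hdx] at h
    by_cases hc : oy ≠ y ∨ dx * (ox - x) ≤ 0
    · rw [if_pos hc] at h; exact absurd h (by simp)
    · rw [if_neg hc] at h
      push_neg at hc
      simp only [Option.some.injEq] at h
      have := hc.2
      omega

lemma ahead_one_iff (x y dx dy ox oy : Int) (hd : DirOK dx dy) :
    pvAhead x y dx dy ox oy = some 1 ↔ (ox = x + dx ∧ oy = y + dy) := by
  rcases hd with ⟨h1, h2⟩ | ⟨h1, h2⟩ | ⟨h1, h2⟩ | ⟨h1, h2⟩ <;> subst h1 <;> subst h2 <;>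
    simp only [pvAhead] <;> norm_num <;> omega

lemma ahead_shift (x y dx dy ox oy : Int) (hd : DirOK dx dy)
    (h : ¬(ox = x + dx ∧ oy = y + dy)) :
    pvAhead (x + dx) (y + dy) dx dy ox oy = Option.map (· - 1) (pvAhead x y dx dy ox oy) := by
  rcases hd with ⟨h1, h2⟩ | ⟨h1, h2⟩ | ⟨h1, h2⟩ | ⟨h1, h2⟩ <;> subst h1 <;> subst h2 <;>
    simp only [pvAhead] <;> norm_num <;>
    split_ifs <;>
    simp only [not_or, not_not, not_le, not_and, Option.map_some, Option.map_none,
      Option.some.injEq] at * <;>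
    omega

lemma pvNearFold_acc_le (f : Int × Int → Option Int) :
    ∀ (pts : List (Int × Int)) (v : Int), ∃ u, pvNearFold f pts (some v) = some u ∧ u ≤ v := by
  intro pts
  induction pts with
  | nil => intro v; exact ⟨v, rfl, le_refl v⟩
  | cons p r ih =>
    intro v
    simp only [pvNearFold]
    cases hf : f p with
    | none => exact ih v
    | some t =>
      by_cases htv : t < v
      · simp only [if_pos htv]
        obtain ⟨u, hu, huv⟩ := ih t
        exact ⟨u, hu, by omega⟩
      · simp only [if_neg htv]
        exact ih v

lemma pvNearFold_ub (f : Int × Int → Option Int) :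
    ∀ (pts : List (Int × Int)) (acc : Option Int) (p : Int × Int) (t : Int),
      p ∈ pts → f p = some t → ∃ u, pvNearFold f pts acc = some u ∧ u ≤ t := by
  intro pts
  induction pts with
  | nil => intro _ _ _ h; simp at h
  | cons q r ih =>
    intro acc p t hp hf
    simp only [pvNearFold]
    rcases List.mem_cons.mp hp with rfl | hpr
    · rw [hf]
      cases acc with
      | none => exact pvNearFold_acc_le f r t
      | some u =>
        by_cases htu : t < u
        · simp only [if_pos htu]; exact pvNearFold_acc_le f r t
        · simp only [if_neg htu]
          obtain ⟨w, hw, hwu⟩ := pvNearFold_acc_le f r u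
          exact ⟨w, hw, by omega⟩
    · exact ih _ p t hpr hf

lemma pvNearFold_lb (f : Int × Int → Option Int) (c : Int) :
    ∀ (pts : List (Int × Int)) (acc : Option Int),
      (∀ p ∈ pts, ∀ t, f p = some t → c ≤ t) → (∀ u, acc = some u → c ≤ u) →
      ∀ u, pvNearFold f pts acc = some u → c ≤ u := by
  intro pts
  induction pts with
  | nil => intro acc _ hacc u hu; exact hacc u hu
  | cons p r ih =>
    intro acc hpts hacc u hu
    simp only [pvNearFold] at hu
    refine ih _ (fun q hq => hpts q (List.mem_cons_of_mem _ hq)) ?_ u hu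
    intro v hv
    cases hf : f p with
    | none => rw [hf] at hv; exact hacc v hv
    | some t =>
      rw [hf] at hv
      have hct : c ≤ t := hpts p List.mem_cons_self t hf
      cases acc with
      | none => simp at hv; omega
      | some w =>
        have hcw : c ≤ w := hacc w rfl
        by_cases htw : t < w
        · simp only [if_pos htw] at hv; simp at hv; omega
        · simp only [if_neg htw] at hv; simp at hv; omega

lemma pvNearFold_some_exists (f : Int × Int → Option Int) :
    ∀ (pts : List (Int × Int)) (acc : Option Int) (u : Int),
      pvNearFold f pts acc = some u → acc = some u ∨ ∃ p ∈ pts, f p = some u := by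
  intro pts
  induction pts with
  | nil => intro acc u h; exact Or.inl h
  | cons p r ih =>
    intro acc u h
    simp only [pvNearFold] at h
    rcases ih _ u h with hacc | ⟨q, hq, hfq⟩
    · cases hf : f p with
      | none => rw [hf] at hacc; exact Or.inl hacc
      | some t =>
        rw [hf] at hacc
        cases acc with
        | none =>
          simp at hacc
          exact Or.inr ⟨p, List.mem_cons_self, by rw [hf, hacc]⟩
        | some w =>
          by_cases htw : t < w
          · simp only [if_pos htw] at hacc
            simp at hacc
            exact Or.inr ⟨p, List.mem_cons_self, by rw [hf, hacc]⟩
          · simp only [if_neg htw] at hacc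
            exact Or.inl hacc
    · exact Or.inr ⟨q, List.mem_cons_of_mem _ hq, hfq⟩

lemma pvNearFold_shift (f g : Int × Int → Option Int) :
    ∀ (pts : List (Int × Int)), (∀ p ∈ pts, g p = Option.map (· - 1) (f p)) →
      ∀ acc, pvNearFold g pts (Option.map (· - 1) acc) = Option.map (· - 1) (pvNearFold f pts acc) := by
  intro pts
  induction pts with
  | nil => intro _ acc; rfl
  | cons p r ih =>
    intro hfg acc
    simp only [pvNearFold]
    have hne : ∀ q ∈ r, g q = Option.map (· - 1) (f q) :=
      fun q hq => hfg q (List.mem_cons_of_mem _ hq)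
    rw [hfg p List.mem_cons_self]
    cases hf : f p with
    | none => exact ih hne acc
    | some t =>
      cases acc with
      | none => exact ih hne (some t)
      | some u =>
        simp only [Option.map_some]
        have : (if t - 1 < u - 1 then some (t - 1) else some (u - 1)) =
            Option.map (· - 1) (if t < u then some t else some u) := by
          by_cases h : t < u
          · rw [if_pos h, if_pos (by omega)]; rfl
          · rw [if_neg h, if_neg (by omega)]; rfl
        rw [this]
        exact ih hne (if t < u then some t else some u)

lemma near_ge_one (pts : List (Int × Int)) (x y dx dy t : Int)
    (h : pvNear pts x y dx dy = some t) : 1 ≤ t := by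
  refine pvNearFold_lb _ 1 pts none ?_ (by simp) t h
  intro p _ u hu
  exact ahead_pos x y dx dy p.1 p.2 u hu

lemma near_one_of_blocked (pts : List (Int × Int)) (x y dx dy : Int) (hd : DirOK dx dy)
    (hb : (x + dx, y + dy) ∈ pts) : pvNear pts x y dx dy = some 1 := by
  have hf : (fun p : Int × Int => pvAhead x y dx dy p.1 p.2) (x + dx, y + dy) = some 1 :=
    (ahead_one_iff x y dx dy _ _ hd).mpr ⟨rfl, rfl⟩
  obtain ⟨u, hu, hu1⟩ :=
    pvNearFold_ub (fun p : Int × Int => pvAhead x y dx dy p.1 p.2) pts none _ 1 hb hf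
  have h1u : 1 ≤ u := near_ge_one pts x y dx dy u hu
  have : u = 1 := by omega
  rw [← this]; exact hu

lemma blocked_of_near_one (pts : List (Int × Int)) (x y dx dy : Int) (hd : DirOK dx dy)
    (h : pvNear pts x y dx dy = some 1) : (x + dx, y + dy) ∈ pts := by
  rcases pvNearFold_some_exists _ pts none 1 h with hacc | ⟨p, hp, hfp⟩
  · simp at hacc
  · have := (ahead_one_iff x y dx dy p.1 p.2 hd).mp hfp
    have hpp : p = (x + dx, y + dy) := Prod.ext this.1 this.2
    rw [← hpp]; exact hp

lemma near_shift (pts : List (Int × Int)) (x y dx dy : Int) (hd : DirOK dx dy)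
    (hnb : (x + dx, y + dy) ∉ pts) :
    pvNear pts (x + dx) (y + dy) dx dy = Option.map (· - 1) (pvNear pts x y dx dy) := by
  unfold pvNear
  have hfg : ∀ p ∈ pts, (fun p : Int × Int => pvAhead (x + dx) (y + dy) dx dy p.1 p.2) p =
      Option.map (· - 1) ((fun p : Int × Int => pvAhead x y dx dy p.1 p.2) p) := by
    intro p hp
    refine ahead_shift x y dx dy p.1 p.2 hd ?_
    intro ⟨h1, h2⟩
    have hpe : p = (x + dx, y + dy) := by
      obtain ⟨p1, p2⟩ := p
      simp_all
    exact hnb (hpe ▸ hp)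
  exact pvNearFold_shift _ _ pts hfg none

-- actual number of steps taken by A's inner loop with fuel m from (x, y)
def pvK (obstacles : List (List Int)) (x y dx dy : Int) (m : Nat) : Int :=
  (pvNear (pvPts obstacles) x y dx dy).elim (m : Int) (fun t => min (m : Int) (t - 1))

lemma pvK_nonneg (obstacles : List (List Int)) (x y dx dy : Int) (m : Nat) :
    0 ≤ pvK obstacles x y dx dy m := by
  cases h : pvNear (pvPts obstacles) x y dx dy with
  | none => simp [pvK, h]
  | some t =>
    have h1 := near_ge_one _ x y dx dy t h
    have h0 : (0 : Int) ≤ (m : Int) := Int.natCast_nonneg m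
    simp only [pvK, h, Option.elim_some]
    omega

-- convexity of the squared distance along a unit-direction segment: the value at step 2
-- is at most the max of the values at steps 1 and k
lemma conv_sq (x y dx dy k : Int) (hd : DirOK dx dy) (hk : 2 ≤ k) :
    (x + 2 * dx) ^ 2 + (y + 2 * dy) ^ 2 ≤
      max ((x + dx) ^ 2 + (y + dy) ^ 2) ((x + k * dx) ^ 2 + (y + k * dy) ^ 2) := by
  have h1 : dx * dx + dy * dy = 1 := by
    rcases hd with ⟨h1, h2⟩ | ⟨h1, h2⟩ | ⟨h1, h2⟩ | ⟨h1, h2⟩ <;> subst h1 <;> subst h2 <;> norm_num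
  by_cases h : 2 * (x * dx + y * dy) + 3 ≤ 0
  · refine le_max_of_le_left ?_
    nlinarith [h1, h]
  · push_neg at h
    refine le_max_of_le_right ?_
    have key : (x + k * dx) ^ 2 + (y + k * dy) ^ 2 - ((x + 2 * dx) ^ 2 + (y + 2 * dy) ^ 2)
        = (k - 2) * (2 * (x * dx + y * dy)) + (k ^ 2 - 4) * (dx * dx + dy * dy) := by ring
    rw [h1] at key
    have hkk : 0 ≤ (k - 2) * (2 * (x * dx + y * dy) + k + 2) :=
      mul_nonneg (by omega) (by omega)
    nlinarith [key, hkk]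

lemma pvStep_closed (obstacles : List (List Int)) (dx dy : Int) (hd : DirOK dx dy) :
    ∀ (m : Nat) (x y md : Int),
      pvStep (PySem.Set.ofList obstacles) dx dy m (x, y, md) =
        (x + pvK obstacles x y dx dy m * dx, y + pvK obstacles x y dx dy m * dy,
         if pvK obstacles x y dx dy m = 0 then md
         else max (max md ((x + dx) ^ 2 + (y + dy) ^ 2))
           ((x + pvK obstacles x y dx dy m * dx) ^ 2 + (y + pvK obstacles x y dx dy m * dy) ^ 2)) := by
  intro m
  induction m with
  | zero =>
    intro x y md
    have hk : pvK obstacles x y dx dy 0 = 0 := by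
      cases h : pvNear (pvPts obstacles) x y dx dy with
      | none => simp [pvK, h]
      | some t =>
        have h1 := near_ge_one _ x y dx dy t h
        simp only [pvK, h, Option.elim_some, Nat.cast_zero]
        omega
    rw [hk]
    norm_num [pvStep]
  | succ m ih =>
    intro x y md
    by_cases hb : (x + dx, y + dy) ∈ pvPts obstacles
    · have hc : PySem.Set.contains (PySem.Set.ofList obstacles) [x + dx, y + dy] = true :=
        (contains_iff_pts obstacles _ _).mpr hb
      have hk : pvK obstacles x y dx dy (m + 1) = 0 := by
        simp only [pvK, near_one_of_blocked _ x y dx dy hd hb, Option.elim_some]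
        have h0 : (0 : Int) ≤ ((m + 1 : Nat) : Int) := Int.natCast_nonneg _
        omega
      rw [hk]
      simp only [pvStep]
      rw [hc]
      norm_num
    · have hc : PySem.Set.contains (PySem.Set.ofList obstacles) [x + dx, y + dy] = false := by
        rcases Bool.eq_false_or_eq_true (PySem.Set.contains (PySem.Set.ofList obstacles) [x + dx, y + dy]) with h | h
        · exact absurd ((contains_iff_pts obstacles _ _).mp h) hb
        · exact h
      have hstep : pvStep (PySem.Set.ofList obstacles) dx dy (m + 1) (x, y, md) =
          pvStep (PySem.Set.ofList obstacles) dx dy m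
            (x + dx, y + dy, max md ((x + dx) ^ 2 + (y + dy) ^ 2)) := by
        simp only [pvStep]
        rw [hc]
        norm_num
      rw [hstep, ih]
      -- t ≥ 2 when there is a nearest obstacle and the next cell is free
      have ht2 : ∀ t, pvNear (pvPts obstacles) x y dx dy = some t → 2 ≤ t := by
        intro t ht
        have h1t := near_ge_one _ x y dx dy t ht
        rcases (by omega : t = 1 ∨ 2 ≤ t) with rfl | h
        · exact absurd (blocked_of_near_one _ x y dx dy hd ht) hb
        · exact h
      have hk1 : 1 ≤ pvK obstacles x y dx dy (m + 1) := by
        cases h : pvNear (pvPts obstacles) x y dx dy with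
        | none =>
          simp only [pvK, h, Option.elim_none]
          push_cast; omega
        | some t =>
          have h2 := ht2 t h
          simp only [pvK, h, Option.elim_some]
          push_cast; omega
      have hks : pvK obstacles (x + dx) (y + dy) dx dy m = pvK obstacles x y dx dy (m + 1) - 1 := by
        cases h : pvNear (pvPts obstacles) x y dx dy with
        | none =>
          simp only [pvK, near_shift _ x y dx dy hd hb, h, Option.map_none, Option.elim_none]
          push_cast; omega
        | some t =>
          simp only [pvK, near_shift _ x y dx dy hd hb, h, Option.map_some, Option.elim_some]
          push_cast; omega
      set k := pvK obstacles x y dx dy (m + 1) with hkdef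
      rw [hks]
      have hxy1 : x + dx + (k - 1) * dx = x + k * dx := by ring
      have hxy2 : y + dy + (k - 1) * dy = y + k * dy := by ring
      rw [hxy1, hxy2]
      by_cases hk0 : k = 1
      · rw [hk0]
        norm_num
      · have hk2 : 2 ≤ k := by omega
        rw [if_neg (by omega : ¬(k - 1 = 0)), if_neg (by omega : ¬(k = 0))]
        have hf2 : (x + dx + dx) ^ 2 + (y + dy + dy) ^ 2 = (x + 2 * dx) ^ 2 + (y + 2 * dy) ^ 2 := by
          ring
        rw [hf2]
        have hconv := conv_sq x y dx dy k hd hk2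
        generalize (x + 2 * dx) ^ 2 + (y + 2 * dy) ^ 2 = f2 at *
        generalize (x + dx) ^ 2 + (y + dy) ^ 2 = f1 at *
        generalize (x + k * dx) ^ 2 + (y + k * dy) ^ 2 = fk at *
        simp only [Prod.mk.injEq, true_and]
        omega

lemma loop_eq (obstacles : List (List Int)) (s : Int × Int × Int × Int) (c : Int) :
    pvLoopA (PySem.Set.ofList obstacles) s c = pvLoopB (pvPts obstacles) s c := by
  obtain ⟨x, y, d, md⟩ := s
  by_cases h1 : c = -1
  · simp [pvLoopA, pvLoopB, h1]
  by_cases h2 : c = -2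
  · simp [pvLoopA, pvLoopB, h2]
  by_cases h3 : c > 0
  · have hd := pvDir_ok d
    have hcn : ((c.toNat : Nat) : Int) = c := Int.toNat_of_nonneg (by omega)
    have hkb : (match pvNear (pvPts obstacles) x y (pvDir d).1 (pvDir d).2 with
        | none => c
        | some t => min c (t - 1)) = pvK obstacles x y (pvDir d).1 (pvDir d).2 c.toNat := by
      cases h : pvNear (pvPts obstacles) x y (pvDir d).1 (pvDir d).2 <;>
        simp [pvK, h, hcn]
    simp only [pvLoopA, pvLoopB, pvDirB_eq, if_neg h1, if_neg h2, if_pos h3]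
    rw [pvStep_closed obstacles (pvDir d).1 (pvDir d).2 hd c.toNat x y md, hkb]
    set k := pvK obstacles x y (pvDir d).1 (pvDir d).2 c.toNat with hkd
    have hk0 : 0 ≤ k := pvK_nonneg obstacles x y (pvDir d).1 (pvDir d).2 c.toNat
    by_cases hk : k = 0
    · rw [hk]
      norm_num
    · rw [if_pos (by omega : k > 0), if_neg hk]
      refine Prod.ext (by ring) (Prod.ext (by ring) (Prod.ext rfl ?_))
      simp only
      ring_nf
  · have hcz : c.toNat = 0 := by omega
    simp [pvLoopA, pvLoopB, pvDirB_eq, h1, h2, h3, hcz, pvStep]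

-- ===== VERDICT (by name: the statement is the Claim_ definition above) =====
theorem robotSimTwo_spec : Claim_equal_robotSimTwo := by
  intro commands obstacles _
  unfold Spec_robotSimTwo robotSimTwo robotSimTwo_alt
  have hf : pvLoopA (PySem.Set.ofList obstacles) = pvLoopB (pvPts obstacles) :=
    funext fun s => funext fun c => loop_eq obstacles s c
  rw [hf]
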